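-- pv_equiv track=rewrite | github.com/Daiego43/CodigoBacon | baconcoding.py | __montarLista
-- ===== SOURCE A (Python) =====
-- def __montarLista(texto, message):
--     l = []
--     traducido = list(message)
--     i = 0
--     while i < len(texto) and traducido != []:
--         if texto[i].isalpha():
--             l.append([traducido.pop(0), texto[i]])
--         else:
--             l.append([texto[i], texto[i]])
--         i += 1
--     return l
-- ===== SOURCE B (Python) =====
-- def __montarLista(texto, message):
--     l = []
--     i = 0
--     n = len(texto)
--     for m in message:
--         # copy non-alphabetic characters verbatim until the next letter
--         while i < n and not texto[i].isalpha():
--             l.append([texto[i], texto[i]])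
--             i += 1
--         if i == n:
--             break
--         l.append([m, texto[i]])
--         i += 1
--     return l
-- ===== Notes on version B (the rewrite author's own statement) =====
-- stated objective: faster
-- what changed: B inverts the loop structure: it iterates over the message characters in the outer loop and uses an inner while to copy runs of non-alphabetic texto characters, indexing instead of popping from the front of a mutable copy of the message, which makes A quadratic in CPython.
import Mathlib
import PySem

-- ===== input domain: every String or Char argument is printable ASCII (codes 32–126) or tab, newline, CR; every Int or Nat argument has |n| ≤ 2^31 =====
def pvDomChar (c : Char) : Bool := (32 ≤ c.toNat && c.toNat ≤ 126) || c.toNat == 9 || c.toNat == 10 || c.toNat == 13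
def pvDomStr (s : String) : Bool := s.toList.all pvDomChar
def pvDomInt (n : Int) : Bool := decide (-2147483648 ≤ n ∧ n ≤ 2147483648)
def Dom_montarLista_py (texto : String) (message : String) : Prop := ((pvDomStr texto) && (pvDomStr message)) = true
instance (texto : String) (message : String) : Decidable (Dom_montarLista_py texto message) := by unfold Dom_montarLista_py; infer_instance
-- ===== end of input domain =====

-- B inverts the loop structure (outer loop over message, inner while over non-letters); same result, proved equal on all inputs.

-- ===== PORT A =====
-- A's while over i — one flat scan of texto, popping the front of a mutable copy of message.
def montarLista_goA : List Char → List Char → List (List String)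
  | [], _ => []
  | _, [] => []
  | t :: ts, m :: ms =>
      if PySem.Chars.isalpha t then
        [String.ofList [m], String.ofList [t]] :: montarLista_goA ts ms
      else
        [String.ofList [t], String.ofList [t]] :: montarLista_goA ts (m :: ms)

def montarLista_py (texto : String) (message : String) : List (List String) :=
  montarLista_goA texto.toList message.toList

-- ===== PORT B =====
-- inner while: copy non-letter chars as [c, c] pairs, return (copied pairs, rest of texto from the first letter)
def montarLista_skipB : List Char → List (List String) × List Char
  | [] => ([], [])
  | c :: cs =>
      if PySem.Chars.isalpha c then ([], c :: cs)
      else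
        let r := montarLista_skipB cs
        ([String.ofList [c], String.ofList [c]] :: r.1, r.2)

-- outer for over the message characters
def montarLista_goB : List Char → List Char → List (List String)
  | [], _ => []
  | m :: ms, txt =>
      let r := montarLista_skipB txt
      match r.2 with
      | [] => r.1
      | c :: cs => r.1 ++ ([String.ofList [m], String.ofList [c]] :: montarLista_goB ms cs)

def montarLista_py_alt (texto : String) (message : String) : List (List String) :=
  montarLista_goB message.toList texto.toList

-- ===== PRECONDITION & SPEC =====
def Spec_montarLista_py (texto : String) (message : String) (out : List (List String)) : Prop := out = montarLista_py_alt texto message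
instance (texto : String) (message : String) (out : List (List String)) : Decidable (Spec_montarLista_py texto message out) := by unfold Spec_montarLista_py; infer_instance

-- ===== CLAIM (what is proved, stated in full; the proofs are below) =====
def Claim_equal_montarLista_py : Prop := ∀ (texto : String) (message : String), Dom_montarLista_py texto message → Spec_montarLista_py texto message (montarLista_py texto message)

-- ===== LEMMAS AND PROOFS =====

-- B on a non-letter head just copies it, for any non-empty message
theorem montarLista_goB_cons_notalpha (m : Char) (ms : List Char) (c : Char) (cs : List Char)
    (h : PySem.Chars.isalpha c = false) :
    montarLista_goB (m :: ms) (c :: cs) =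
      [String.ofList [c], String.ofList [c]] :: montarLista_goB (m :: ms) cs := by
  simp only [montarLista_goB, montarLista_skipB, h, Bool.false_eq_true, if_false]
  cases (montarLista_skipB cs).2 <;> simp

theorem montarLista_goA_eq_goB (txt msg : List Char) :
    montarLista_goA txt msg = montarLista_goB msg txt := by
  induction txt generalizing msg with
  | nil =>
      cases msg with
      | nil => rfl
      | cons m ms => simp [montarLista_goA, montarLista_goB, montarLista_skipB]
  | cons t ts ih =>
      cases msg with
      | nil => rfl
      | cons m ms =>
        by_cases h : PySem.Chars.isalpha t
        · simp [montarLista_goA, montarLista_goB, montarLista_skipB, h, ih]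
        · rw [montarLista_goB_cons_notalpha m ms t ts (by simpa using h)]
          simp [montarLista_goA, h, ih]

-- ===== VERDICT (by name: the statement is the Claim_ definition above) =====
theorem montarLista_py_spec : Claim_equal_montarLista_py := by
  intro texto message _
  unfold Spec_montarLista_py montarLista_py montarLista_py_alt
  exact montarLista_goA_eq_goB _ _
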